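-- pv_equiv track=rewrite | github.com/Shaikarshadh03/face_analysis | backend.py | analyze_emotional_tone
-- ===== SOURCE A (Python) =====
-- def analyze_emotional_tone(emotions):
--     """Analyze emotional patterns"""
--     if not emotions:
--         return {
--             'dominant': 'neutral',
--             'secondary': 'calm',
--             'variability': 'stable'
--         }
--
--     # Count emotion occurrences
--     emotion_counts = {}
--     for item in emotions:
--         emotion = item['dominant']
--         emotion_counts[emotion] = emotion_counts.get(emotion, 0) + 1
--
--     # Sort emotions by frequency
--     sorted_emotions = sorted(emotion_counts.items(), key=lambda x: x[1], reverse=True)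
--
--     dominant = sorted_emotions[0][0] if sorted_emotions else 'neutral'
--     secondary = sorted_emotions[1][0] if len(sorted_emotions) > 1 else 'calm'
--
--     # Determine variability
--     unique_emotions = len(emotion_counts)
--     if unique_emotions >= 4:
--         variability = 'variable'
--     elif unique_emotions >= 2:
--         variability = 'somewhat variable'
--     else:
--         variability = 'stable'
--
--     return {
--         'dominant': dominant,
--         'secondary': secondary,
--         'variability': variability
--     }
-- ===== SOURCE B (Python) =====
-- def analyze_emotional_tone(emotions):
--     """Analyze emotional patterns (single linear top-2 pass instead of sorting)"""
--     if not emotions: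
--         return {
--             'dominant': 'neutral',
--             'secondary': 'calm',
--             'variability': 'stable'
--         }
--
--     emotion_counts = {}
--     for item in emotions:
--         emotion = item['dominant']
--         emotion_counts[emotion] = emotion_counts.get(emotion, 0) + 1
--
--     # One pass over insertion order; strict '>' so the earliest-inserted
--     # label wins ties, exactly like a stable descending sort.
--     best = None
--     second = None
--     for pair in emotion_counts.items():
--         if best is None or pair[1] > best[1]:
--             second = best
--             best = pair
--         elif second is None or pair[1] > second[1]:
--             second = pair
--
--     dominant = best[0]
--     secondary = second[0] if second is not None else 'calm'
--
--     n = len(emotion_counts)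
--     if n >= 4:
--         variability = 'variable'
--     elif n >= 2:
--         variability = 'somewhat variable'
--     else:
--         variability = 'stable'
--
--     return {
--         'dominant': dominant,
--         'secondary': secondary,
--         'variability': variability
--     }
-- ===== Notes on version B (the rewrite author's own statement) =====
-- stated objective: alternative
-- what changed: A sorts the whole emotion-count dict by frequency and indexes the first two entries; B replaces the sort by a single linear pass over the counts maintaining best/second with strict '>' comparisons (insertion order preserves A's stable tie-breaking).
import Mathlib
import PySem

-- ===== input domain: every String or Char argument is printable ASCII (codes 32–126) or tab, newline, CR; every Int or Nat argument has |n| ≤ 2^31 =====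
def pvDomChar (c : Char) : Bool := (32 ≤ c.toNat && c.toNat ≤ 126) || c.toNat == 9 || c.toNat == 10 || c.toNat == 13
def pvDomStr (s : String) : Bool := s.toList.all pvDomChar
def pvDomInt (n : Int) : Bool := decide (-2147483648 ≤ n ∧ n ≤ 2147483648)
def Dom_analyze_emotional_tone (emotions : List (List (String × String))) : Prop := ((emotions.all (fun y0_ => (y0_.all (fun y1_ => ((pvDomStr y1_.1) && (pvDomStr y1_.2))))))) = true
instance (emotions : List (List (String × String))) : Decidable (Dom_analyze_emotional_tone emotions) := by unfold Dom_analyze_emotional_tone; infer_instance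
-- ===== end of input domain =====

-- B replaces A's sort of the count dict by one linear top-2 pass (same result; no measured speedup claimed).

-- ===== PORT A =====
-- item['dominant']: first-match lookup in the association list; where the key is
-- absent Python raises KeyError (excluded by Pre_) and the port defaults to "".
def pvLabelOf (item : List (String × String)) : String :=
  (((item.find? (fun p => p.1 == "dominant")).map Prod.snd).getD "")

def pvCounts (emotions : List (List (String × String))) : PySem.Dict String Int :=
  emotions.foldl
    (fun d item =>
      let e := pvLabelOf item
      d.insert e (d.getD e 0 + 1)) PySem.Dict.empty

def analyze_emotional_tone (emotions : List (List (String × String))) : List (String × String) :=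
  if emotions = [] then
    [("dominant", "neutral"), ("secondary", "calm"), ("variability", "stable")]
  else
    let emotion_counts := pvCounts emotions
    let sorted_emotions := PySem.List.sorted emotion_counts.items (fun x => x.2) true
    let dominant := match sorted_emotions with | [] => "neutral" | p :: _ => p.1
    let secondary := match sorted_emotions with | _ :: q :: _ => q.1 | _ => "calm"
    let unique_emotions := PySem.Dict.size emotion_counts
    let variability :=
      if unique_emotions ≥ 4 then "variable"
      else if unique_emotions ≥ 2 then "somewhat variable"
      else "stable"
    [("dominant", dominant), ("secondary", secondary), ("variability", variability)]

-- ===== PORT B =====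
-- the body of B's loop: best/second update with strict '>'
def pvTop2Step (st : Option (String × Int) × Option (String × Int)) (pair : String × Int) :
    Option (String × Int) × Option (String × Int) :=
  match st with
  | (none, _) => (some pair, none)            -- best is None: second := best (= None)
  | (some b, s) =>
    if pair.2 > b.2 then (some pair, some b)
    else
      match s with
      | none => (some b, some pair)
      | some ss => if pair.2 > ss.2 then (some b, some pair) else (some b, some ss)

def analyze_emotional_tone_alt (emotions : List (List (String × String))) : List (String × String) :=
  if emotions = [] then
    [("dominant", "neutral"), ("secondary", "calm"), ("variability", "stable")]
  else
    let emotion_counts := pvCounts emotions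
    let r := emotion_counts.items.foldl pvTop2Step (none, none)
    -- best[0]: best is never None here (emotions nonempty); the none arm is unreachable
    let dominant := match r.1 with | some p => p.1 | none => ""
    let secondary := match r.2 with | some q => q.1 | none => "calm"
    let n := PySem.Dict.size emotion_counts
    let variability :=
      if n ≥ 4 then "variable"
      else if n ≥ 2 then "somewhat variable"
      else "stable"
    [("dominant", dominant), ("secondary", secondary), ("variability", variability)]

-- ===== PRECONDITION & SPEC =====
-- Pre_ excludes exactly the inputs where some item dict lacks the key 'dominant':
-- there A (and B) raise KeyError and return nothing.
def Pre_analyze_emotional_tone (emotions : List (List (String × String))) : Prop :=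
  ∀ item ∈ emotions, item.any (fun p => p.1 == "dominant") = true
instance (emotions : List (List (String × String))) : Decidable (Pre_analyze_emotional_tone emotions) := by unfold Pre_analyze_emotional_tone; infer_instance

def pvWitness_analyze_emotional_tone : (List (List (String × String))) :=
  [[("dominant", "happy")], [("dominant", "sad"), ("face", "1")]]

def Spec_analyze_emotional_tone (emotions : List (List (String × String))) (out : List (String × String)) : Prop := out = analyze_emotional_tone_alt emotions
instance (emotions : List (List (String × String))) (out : List (String × String)) : Decidable (Spec_analyze_emotional_tone emotions out) := by unfold Spec_analyze_emotional_tone; infer_instance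

-- ===== CLAIM (what is proved, stated in full; the proofs are below) =====
def Claim_equal_analyze_emotional_tone : Prop := ∀ (emotions : List (List (String × String))), Dom_analyze_emotional_tone emotions → Pre_analyze_emotional_tone emotions → Spec_analyze_emotional_tone emotions (analyze_emotional_tone emotions)

-- ===== LEMMAS AND PROOFS =====

-- one insertion step of the (reverse, stable) insertion sort changes the first two
-- elements exactly as B's best/second update does
theorem first2_insertBy (x : String × Int) (acc : List (String × Int)) :
    ((PySem.List.insertBy (fun a b => decide (b.2 < a.2)) x acc)[0]?,
     (PySem.List.insertBy (fun a b => decide (b.2 < a.2)) x acc)[1]?)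
      = pvTop2Step (acc[0]?, acc[1]?) x := by
  match acc with
  | [] => simp [PySem.List.insertBy, pvTop2Step]
  | a :: t =>
    by_cases h : a.2 < x.2
    · simp [PySem.List.insertBy, pvTop2Step, h]
    · match t with
      | [] => simp [PySem.List.insertBy, pvTop2Step, h]
      | a2 :: t' =>
        by_cases h2 : a2.2 < x.2 <;>
          simp [PySem.List.insertBy, pvTop2Step, h, h2]

theorem first2_foldl (l : List (String × Int)) (acc : List (String × Int)) :
    ((l.foldl (fun acc x => PySem.List.insertBy (fun a b => decide (b.2 < a.2)) x acc) acc)[0]?,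
     (l.foldl (fun acc x => PySem.List.insertBy (fun a b => decide (b.2 < a.2)) x acc) acc)[1]?)
      = l.foldl pvTop2Step (acc[0]?, acc[1]?) := by
  induction l generalizing acc with
  | nil => rfl
  | cons x t ih =>
    simp only [List.foldl_cons]
    rw [ih, first2_insertBy]

-- the first two elements of the reverse-sorted items ARE B's fold result
theorem first2_sorted (l : List (String × Int)) :
    ((PySem.List.sorted l (fun x => x.2) true)[0]?,
     (PySem.List.sorted l (fun x => x.2) true)[1]?)
      = l.foldl pvTop2Step (none, none) := by
  rw [PySem.List.sorted_rev_eq_foldl_insertBy]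
  exact first2_foldl l []

theorem counts_items_ne_nil (l : List (List (String × String))) (d : PySem.Dict String Int)
    (h : d.items ≠ [] ∨ l ≠ []) :
    (l.foldl (fun d item => let e := pvLabelOf item; d.insert e (d.getD e 0 + 1)) d).items ≠ [] := by
  induction l generalizing d with
  | nil => simpa using h.resolve_right (by simp)
  | cons x t ih =>
    simp only [List.foldl_cons]
    apply ih
    left
    rw [PySem.Dict.items_insert]
    split
    · intro hc
      have := PySem.Dict.contains_iff_mem_keys (d := d) (k := pvLabelOf x)
      simp only [PySem.Dict.keys] at this
      rename_i hcon
      rw [this] at hcon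
      rcases List.mem_map.1 hcon with ⟨p, hp, _⟩
      rw [List.map_eq_nil_iff.1 hc] at hp
      exact absurd hp (List.not_mem_nil)
    · simp

-- ===== VERDICT (by name: the statement is the Claim_ definition above) =====
theorem analyze_emotional_tone_spec : Claim_equal_analyze_emotional_tone := by
  intro emotions _ _
  unfold Spec_analyze_emotional_tone analyze_emotional_tone analyze_emotional_tone_alt
  by_cases hne : emotions = []
  · simp [hne]
  · simp only [hne, if_false]
    have hitems : (pvCounts emotions).items ≠ [] := by
      unfold pvCounts
      exact counts_items_ne_nil emotions PySem.Dict.empty (Or.inr hne)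
    have h2 := first2_sorted (pvCounts emotions).items
    cases hs : PySem.List.sorted (pvCounts emotions).items (fun x => x.2) true with
    | nil =>
      exact absurd ((PySem.List.sorted_eq_nil_iff _ _ _).1 hs) hitems
    | cons p tail =>
      rw [hs] at h2
      rw [← h2]
      cases tail <;> simp
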